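-- pv_equiv track=rewrite | github.com/hasanzadegan/passportMrzScanner | server1/cropper.py | average_line
-- ===== SOURCE A (Python) =====
-- def average_line(group):
--     """Calculate the average line from a group of lines."""
--     x1_avg = y1_avg = x2_avg = y2_avg = 0
--     n = len(group)
--
--     for (x1, y1, x2, y2) in group:
--         x1_avg += x1
--         y1_avg += y1
--         x2_avg += x2
--         y2_avg += y2
--
--     return (x1_avg // n, y1_avg // n, x2_avg // n, y2_avg // n)
-- ===== SOURCE B (Python) =====
-- def average_line(group):
--     """Calculate the average line from a group of lines."""
--     n = len(group)
--
--     def seg_sum(seg):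
--         if not seg:
--             return (0, 0, 0, 0)
--         if len(seg) == 1:
--             return seg[0]
--         m = len(seg) // 2
--         a = seg_sum(seg[:m])
--         b = seg_sum(seg[m:])
--         return (a[0] + b[0], a[1] + b[1], a[2] + b[2], a[3] + b[3])
--
--     sx1, sy1, sx2, sy2 = seg_sum(group)
--     return (sx1 // n, sy1 // n, sx2 // n, sy2 // n)
-- ===== Notes on version B (the rewrite author's own statement) =====
-- stated objective: alternative
-- what changed: Replaces A's single linear fold with four accumulators by a recursive divide-and-conquer (pairwise/tree) summation over list halves, combining componentwise, then dividing once by n.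
import Mathlib
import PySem

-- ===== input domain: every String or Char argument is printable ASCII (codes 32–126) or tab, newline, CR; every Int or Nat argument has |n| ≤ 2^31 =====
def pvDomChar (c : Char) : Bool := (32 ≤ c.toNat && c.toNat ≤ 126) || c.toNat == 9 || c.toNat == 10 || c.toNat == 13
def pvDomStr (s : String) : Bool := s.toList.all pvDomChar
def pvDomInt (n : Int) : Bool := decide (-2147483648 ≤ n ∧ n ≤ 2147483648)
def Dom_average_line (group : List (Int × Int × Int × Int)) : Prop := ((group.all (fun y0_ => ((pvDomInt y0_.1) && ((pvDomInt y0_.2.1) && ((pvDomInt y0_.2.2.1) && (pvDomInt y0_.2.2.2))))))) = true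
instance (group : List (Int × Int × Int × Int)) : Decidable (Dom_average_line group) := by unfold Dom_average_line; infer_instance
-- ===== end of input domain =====

-- B replaces A's single fused accumulation loop by a recursive divide-and-conquer (tree) summation over list halves; same value since Int addition is associative.

-- ===== PORT A =====
-- A: single loop accumulating the four coordinate sums, then floor-divide each by n.
def average_line (group : List (Int × Int × Int × Int)) : Int × Int × Int × Int :=
  let n : Int := group.length
  let acc := group.foldl
    (fun (s : Int × Int × Int × Int) (l : Int × Int × Int × Int) =>
      (s.1 + l.1, s.2.1 + l.2.1, s.2.2.1 + l.2.2.1, s.2.2.2 + l.2.2.2))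
    (0, 0, 0, 0)
  (PySem.Int.floordiv acc.1 n, PySem.Int.floordiv acc.2.1 n,
   PySem.Int.floordiv acc.2.2.1 n, PySem.Int.floordiv acc.2.2.2 n)

-- ===== PORT B =====
-- B's helper seg_sum: recursive halving; seg[:m] / seg[m:] with 0 ≤ m ≤ len are List.take / List.drop (exact here).
def segSum : List (Int × Int × Int × Int) → Int × Int × Int × Int
  | [] => (0, 0, 0, 0)
  | [p] => p
  | x :: y :: rest =>
      let m := (x :: y :: rest).length / 2
      let a := segSum ((x :: y :: rest).take m)
      let b := segSum ((x :: y :: rest).drop m)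
      (a.1 + b.1, a.2.1 + b.2.1, a.2.2.1 + b.2.2.1, a.2.2.2 + b.2.2.2)
termination_by seg => seg.length
decreasing_by
  · simp [List.length_take]; omega
  · simp; omega

def average_line_alt (group : List (Int × Int × Int × Int)) : Int × Int × Int × Int :=
  let n : Int := group.length
  let s := segSum group
  (PySem.Int.floordiv s.1 n, PySem.Int.floordiv s.2.1 n,
   PySem.Int.floordiv s.2.2.1 n, PySem.Int.floordiv s.2.2.2 n)

-- ===== PRECONDITION & SPEC =====
-- Pre_ excludes the empty group, on which Python A (and B) raise ZeroDivisionError.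
def Pre_average_line (group : List (Int × Int × Int × Int)) : Prop := group ≠ []
instance (group : List (Int × Int × Int × Int)) : Decidable (Pre_average_line group) := by unfold Pre_average_line; infer_instance
def pvWitness_average_line : (List (Int × Int × Int × Int)) := [(1, 2, 3, 4)]
def Spec_average_line (group : List (Int × Int × Int × Int)) (out : Int × Int × Int × Int) : Prop := out = average_line_alt group
instance (group : List (Int × Int × Int × Int)) (out : Int × Int × Int × Int) : Decidable (Spec_average_line group out) := by unfold Spec_average_line; infer_instance

-- ===== CLAIM =====
def Claim_equal_average_line : Prop := ∀ (group : List (Int × Int × Int × Int)), Dom_average_line group → Pre_average_line group → Spec_average_line group (average_line group)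

-- ===== LEMMAS AND PROOFS =====

-- A's fused fold computes exactly the four column sums.
theorem avg_fold_eq (group : List (Int × Int × Int × Int)) (s : Int × Int × Int × Int) :
    group.foldl
      (fun (s : Int × Int × Int × Int) (l : Int × Int × Int × Int) =>
        (s.1 + l.1, s.2.1 + l.2.1, s.2.2.1 + l.2.2.1, s.2.2.2 + l.2.2.2)) s
    = (s.1 + (group.map (·.1)).sum, s.2.1 + (group.map (·.2.1)).sum,
       s.2.2.1 + (group.map (·.2.2.1)).sum, s.2.2.2 + (group.map (·.2.2.2)).sum) := by
  induction group generalizing s with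
  | nil => simp
  | cons h t ih =>
      simp only [List.foldl_cons, List.map_cons, List.sum_cons, ih]
      refine Prod.ext (by ring) (Prod.ext (by ring) (Prod.ext (by ring) (by ring)))

-- B's tree summation also computes exactly the four column sums (addition is associative).
theorem segSum_eq (seg : List (Int × Int × Int × Int)) :
    segSum seg = ((seg.map (·.1)).sum, (seg.map (·.2.1)).sum,
                  (seg.map (·.2.2.1)).sum, (seg.map (·.2.2.2)).sum) := by
  fun_induction segSum seg with
  | case1 => simp
  | case2 p => simp
  | case3 x y rest m a b ih1 ih2 =>
      dsimp only [m, a, b]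
      rw [ih1, ih2]
      conv_rhs => rw [← List.take_append_drop ((x :: y :: rest).length / 2) (x :: y :: rest)]
      simp

-- ===== VERDICT =====
theorem average_line_spec : Claim_equal_average_line := by
  intro group _ _
  unfold Spec_average_line average_line average_line_alt
  simp [avg_fold_eq, segSum_eq]
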